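-- pv_equiv track=rewrite | github.com/DOAJ/doaj | portality/tasks/reporting.py | _get_best_role
-- ===== SOURCE A (Python) =====
-- def _get_best_role(roles):
--     role_precedence = ["associate_editor", "editor", "admin"]
--     best_role = None
--     for r in roles:
--         try:
--             if best_role is None and r in role_precedence:
--                 best_role = r
--             if role_precedence.index(r) > role_precedence.index(best_role):
--                 best_role = r
--         except ValueError:
--             pass                            # The user has a role not in our precedence list (e.g. api) - ignore it.
--
--     return best_role
-- ===== SOURCE B (Python) =====
-- def _get_best_role(roles):
--     for r in reversed(["associate_editor", "editor", "admin"]):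
--         if r in roles:
--             return r
--     return None
-- ===== Notes on version B (the rewrite author's own statement) =====
-- stated objective: simpler
-- what changed: Instead of scanning the input roles while tracking a running best via list.index with ValueError handling, B scans the fixed precedence table from highest to lowest and returns the first role present in the input.
import Mathlib
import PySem

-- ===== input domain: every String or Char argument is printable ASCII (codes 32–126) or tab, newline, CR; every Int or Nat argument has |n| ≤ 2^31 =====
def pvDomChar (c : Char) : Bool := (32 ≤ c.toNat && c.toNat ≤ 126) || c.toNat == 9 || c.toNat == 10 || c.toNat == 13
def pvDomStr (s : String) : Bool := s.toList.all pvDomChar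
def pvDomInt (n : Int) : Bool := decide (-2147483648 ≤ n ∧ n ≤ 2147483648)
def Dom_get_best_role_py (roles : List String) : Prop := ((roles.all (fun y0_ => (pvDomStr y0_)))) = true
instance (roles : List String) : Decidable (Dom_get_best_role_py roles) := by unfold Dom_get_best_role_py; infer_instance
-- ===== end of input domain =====

-- B scans the fixed precedence table from highest to lowest and returns the first role
-- present in the input, instead of A's running-best scan of the input with list.index
-- and ValueError handling (objective: simpler).

-- ===== PORT A =====
def gbPrec : List String := ["associate_editor", "editor", "admin"]

-- one iteration of A's for-loop (the try/except ValueError is the two index? matches)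
def gbStep (best : Option String) (r : String) : Option String :=
  let b1 := if best = none ∧ gbPrec.contains r then some r else best
  match PySem.List.index? gbPrec r,
        (match b1 with
         | some x => PySem.List.index? gbPrec x
         | none => none) with   -- index(None) raises ValueError → except: pass
  | some i, some j => if j < i then some r else b1
  | _, _ => b1

def get_best_role_py (roles : List String) : Option String :=
  roles.foldl gbStep none

-- ===== PORT B =====
def get_best_role_py_alt (roles : List String) : Option String :=
  (["associate_editor", "editor", "admin"].reverse).find? (fun r => roles.contains r)

-- ===== PRECONDITION & SPEC =====
def Spec_get_best_role_py (roles : List String) (out : Option String) : Prop := out = get_best_role_py_alt roles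
instance (roles : List String) (out : Option String) : Decidable (Spec_get_best_role_py roles out) := by unfold Spec_get_best_role_py; infer_instance

-- ===== CLAIM (what is proved, stated in full; the proofs are below) =====
def Claim_equal_get_best_role_py : Prop := ∀ (roles : List String), Dom_get_best_role_py roles → Spec_get_best_role_py roles (get_best_role_py roles)

-- ===== LEMMAS AND PROOFS =====

-- precedence rank of the running best (none / roles outside the table rank 0)
def gbRank : Option String → Nat
  | none => 0
  | some s => if s = "admin" then 3 else if s = "editor" then 2 else if s = "associate_editor" then 1 else 0

-- leftmost argument of maximal rank
def gbMax (a b : Option String) : Option String := if gbRank a < gbRank b then b else a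

-- invariant on A's accumulator
def gbOK (b : Option String) : Prop :=
  b = none ∨ b = some "associate_editor" ∨ b = some "editor" ∨ b = some "admin"

theorem gbMax_assoc (a b c : Option String) : gbMax (gbMax a b) c = gbMax a (gbMax b c) := by
  unfold gbMax; split_ifs <;> first | rfl | omega

theorem gbStep_eq (best : Option String) (r : String) (h : gbOK best) :
    gbStep best r = gbMax best (if gbPrec.contains r then some r else none) := by
  by_cases h1 : r = "associate_editor"
  · subst h1; rcases h with h | h | h | h <;> subst h <;> decide
  by_cases h2 : r = "editor"
  · subst h2; rcases h with h | h | h | h <;> subst h <;> decide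
  by_cases h3 : r = "admin"
  · subst h3; rcases h with h | h | h | h <;> subst h <;> decide
  have h1' : "associate_editor" ≠ r := fun e => h1 e.symm
  have h2' : "editor" ≠ r := fun e => h2 e.symm
  have h3' : "admin" ≠ r := fun e => h3 e.symm
  rcases h with h | h | h | h <;> subst h <;>
    simp [gbStep, gbMax, gbRank, gbPrec, PySem.List.index?, h1, h2, h3, h1', h2', h3',
      List.idxOf?, List.findIdx?, List.findIdx?.go]

theorem gbOK_step (best : Option String) (r : String) (h : gbOK best) : gbOK (gbStep best r) := by
  rw [gbStep_eq best r h]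
  by_cases hc : gbPrec.contains r
  · have hr : r = "associate_editor" ∨ r = "editor" ∨ r = "admin" := by
      simpa [gbPrec] using hc
    unfold gbMax; split_ifs <;> simp_all [gbOK]
  · unfold gbMax; split_ifs <;> simp_all [gbOK, gbRank]

theorem alt_cons (r : String) (rs : List String) :
    get_best_role_py_alt (r :: rs) =
      gbMax (if gbPrec.contains r then some r else none) (get_best_role_py_alt rs) := by
  by_cases h1 : r = "associate_editor"
  · subst h1
    by_cases m1 : "associate_editor" ∈ rs <;> by_cases m2 : "editor" ∈ rs <;>
      by_cases m3 : "admin" ∈ rs <;>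
      simp [get_best_role_py_alt, List.find?, gbMax, gbRank, gbPrec, m1, m2, m3]
  by_cases h2 : r = "editor"
  · subst h2
    by_cases m1 : "associate_editor" ∈ rs <;> by_cases m2 : "editor" ∈ rs <;>
      by_cases m3 : "admin" ∈ rs <;>
      simp [get_best_role_py_alt, List.find?, gbMax, gbRank, gbPrec, m1, m2, m3]
  by_cases h3 : r = "admin"
  · subst h3
    by_cases m1 : "associate_editor" ∈ rs <;> by_cases m2 : "editor" ∈ rs <;>
      by_cases m3 : "admin" ∈ rs <;>
      simp [get_best_role_py_alt, List.find?, gbMax, gbRank, gbPrec, m1, m2, m3]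
  have h1' : "associate_editor" ≠ r := fun e => h1 e.symm
  have h2' : "editor" ≠ r := fun e => h2 e.symm
  have h3' : "admin" ≠ r := fun e => h3 e.symm
  by_cases m1 : "associate_editor" ∈ rs <;> by_cases m2 : "editor" ∈ rs <;>
    by_cases m3 : "admin" ∈ rs <;>
    simp [get_best_role_py_alt, List.find?, gbMax, gbRank, gbPrec, m1, m2, m3,
      h1, h2, h3, h1', h2', h3']

theorem gbFold_eq (rs : List String) :
    ∀ best, gbOK best → rs.foldl gbStep best = gbMax best (get_best_role_py_alt rs) := by
  induction rs with
  | nil =>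
    intro best h
    simp [get_best_role_py_alt, gbMax, gbRank]
  | cons r rs ih =>
    intro best h
    rw [List.foldl_cons, ih _ (gbOK_step best r h), gbStep_eq best r h, gbMax_assoc, ← alt_cons]

theorem gbOK_alt (roles : List String) : gbOK (get_best_role_py_alt roles) := by
  by_cases m1 : "associate_editor" ∈ roles <;> by_cases m2 : "editor" ∈ roles <;>
    by_cases m3 : "admin" ∈ roles <;>
    simp [get_best_role_py_alt, gbOK, List.find?, m1, m2, m3]

-- ===== VERDICT (by name: the statement is the Claim_ definition above) =====
theorem get_best_role_py_spec : Claim_equal_get_best_role_py := by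
  intro roles _
  unfold Spec_get_best_role_py get_best_role_py
  rw [gbFold_eq roles none (Or.inl rfl)]
  rcases gbOK_alt roles with h | h | h | h <;> simp [h, gbMax, gbRank]
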